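-- pv_equiv track=rewrite | github.com/krysnuvadga/learning_portfolio | preps/fancy.py | cond2
-- ===== SOURCE A (Python) =====
-- def cond2(s):
--     for i in range(len(s) - 2):
--         if ((s[i] < s[i + 1] and
--              s[i + 1] < s[i + 2]) or
--             (s[i] > s[i + 1] and
--              s[i + 1] > s[i + 2])):
--             return True
--
--     return False
-- ===== SOURCE B (Python) =====
-- def cond2(s):
--     # Run-length tracking: keep the lengths of the current strictly increasing
--     # and strictly decreasing runs; a monotone triple exists iff a run reaches 3.
--     up = down = 1
--     for a, b in zip(s, s[1:]):
--         up = up + 1 if a < b else 1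
--         down = down + 1 if a > b else 1
--         if up >= 3 or down >= 3:
--             return True
--     return False
-- ===== Notes on version B (the rewrite author's own statement) =====
-- stated objective: alternative
-- what changed: B replaces A's three-element window scan by a single pass over adjacent pairs that maintains run-length accumulators for the current strictly rising and strictly falling runs, returning True when a run reaches length 3.
import Mathlib
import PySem

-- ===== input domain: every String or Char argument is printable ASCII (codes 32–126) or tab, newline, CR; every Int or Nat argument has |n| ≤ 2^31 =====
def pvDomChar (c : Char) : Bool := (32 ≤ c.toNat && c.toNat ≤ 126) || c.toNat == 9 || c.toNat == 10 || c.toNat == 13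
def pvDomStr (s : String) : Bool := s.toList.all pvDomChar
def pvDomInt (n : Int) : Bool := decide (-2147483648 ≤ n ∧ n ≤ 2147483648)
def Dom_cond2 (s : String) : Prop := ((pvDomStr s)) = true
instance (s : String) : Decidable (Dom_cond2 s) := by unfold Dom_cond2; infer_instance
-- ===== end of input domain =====

-- B maintains run-length accumulators for the current strictly rising / falling runs over
-- one pass of adjacent pairs instead of A's three-element window scan (alternative).

-- ===== PORT A =====
-- for i in range(len(s)-2): if (s[i]<s[i+1] and s[i+1]<s[i+2]) or (s[i]>s[i+1] and s[i+1]>s[i+2]): return True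
-- early return True over the loop = List.any over the same index range
def cond2 (s : String) : Bool :=
  let cs := s.toList
  (List.range (cs.length - 2)).any fun i =>
    (decide (cs.getD i ' ' < cs.getD (i+1) ' ') && decide (cs.getD (i+1) ' ' < cs.getD (i+2) ' '))
    || (decide (cs.getD i ' ' > cs.getD (i+1) ' ') && decide (cs.getD (i+1) ' ' > cs.getD (i+2) ' '))

-- ===== PORT B =====
-- the loop body of Source B: update both run lengths, early-return True at run length 3
def pvRun : Int → Int → List (Char × Char) → Bool
  | _, _, [] => false
  | up, down, (a, b) :: t =>
    let up' := if a < b then up + 1 else 1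
    let down' := if a > b then down + 1 else 1
    if up' ≥ 3 || down' ≥ 3 then true else pvRun up' down' t

def cond2_alt (s : String) : Bool :=
  let cs := s.toList
  pvRun 1 1 (cs.zip cs.tail)

-- ===== PRECONDITION & SPEC =====
def Spec_cond2 (s : String) (out : Bool) : Prop := out = cond2_alt s
instance (s : String) (out : Bool) : Decidable (Spec_cond2 s out) := by unfold Spec_cond2; infer_instance

-- ===== CLAIM (what is proved, stated in full; the proofs are below) =====
def Claim_equal_cond2 : Prop := ∀ (s : String), Dom_cond2 s → Spec_cond2 s (cond2 s)

-- ===== LEMMAS AND PROOFS =====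

-- common characterisation: some window of three consecutive chars is strictly monotone
def pvWin : List Char → Bool
  | a :: b :: c :: t =>
    ((decide (a < b) && decide (b < c)) || (decide (a > b) && decide (b > c))) || pvWin (b :: c :: t)
  | _ => false

theorem pvRun_cons (up down : Int) (a b : Char) (t : List (Char × Char)) :
    pvRun up down ((a, b) :: t) =
      (if (if a < b then up + 1 else 1) ≥ 3 || (if a > b then down + 1 else 1) ≥ 3 then true
       else pvRun (if a < b then up + 1 else 1) (if a > b then down + 1 else 1) t) := rfl

theorem run_eq_win : ∀ (rest : List Char) (a b : Char) (up down : Int),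
    (up = 1 ∨ up = 2) → (down = 1 ∨ down = 2) →
    pvRun up down ((a, b) :: ((b :: rest).zip rest)) =
      ((decide (a < b) && decide (up = 2)) || (decide (b < a) && decide (down = 2))
        || pvWin (a :: b :: rest))
  | [], a, b, up, down, hu, hd => by
    rcases hu with rfl | rfl <;> rcases hd with rfl | rfl <;>
      by_cases hab : a < b <;> by_cases hba : b < a <;>
        first
        | exact absurd (lt_trans hab hba) (lt_irrefl a)
        | simp [pvRun, pvWin, hab, hba]
  | c :: t, a, b, up, down, hu, hd => by
    rw [show ((b :: c :: t).zip (c :: t)) = (b, c) :: ((c :: t).zip t) from rfl, pvRun_cons]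
    rcases hu with rfl | rfl <;> rcases hd with rfl | rfl <;>
      by_cases hab : a < b <;> by_cases hba : b < a <;>
      first
      | exact absurd (lt_trans hab hba) (lt_irrefl a)
      | (simp only [hab, hba, if_true, if_false]
         norm_num [run_eq_win t b c 1 1 (Or.inl rfl) (Or.inl rfl),
           run_eq_win t b c 2 1 (Or.inr rfl) (Or.inl rfl),
           run_eq_win t b c 1 2 (Or.inl rfl) (Or.inr rfl), pvWin, hab, hba]
         try simp [pvWin, hab, hba, Bool.or_comm])

theorem alt_eq_win (cs : List Char) : pvRun 1 1 (cs.zip cs.tail) = pvWin cs := by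
  match cs with
  | [] => rfl
  | [a] => rfl
  | a :: b :: rest =>
    have h := run_eq_win rest a b 1 1 (Or.inl rfl) (Or.inl rfl)
    simpa using h

theorem a_eq_win : ∀ (cs : List Char),
    ((List.range (cs.length - 2)).any fun i =>
      (decide (cs.getD i ' ' < cs.getD (i+1) ' ') && decide (cs.getD (i+1) ' ' < cs.getD (i+2) ' '))
      || (decide (cs.getD i ' ' > cs.getD (i+1) ' ') && decide (cs.getD (i+1) ' ' > cs.getD (i+2) ' ')))
      = pvWin cs
  | [] => rfl
  | [_] => rfl
  | [_, _] => rfl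
  | a :: b :: c :: t => by
    have ih := a_eq_win (b :: c :: t)
    have hlen : (a :: b :: c :: t).length - 2 = ((b :: c :: t).length - 2) + 1 := by
      simp [List.length_cons]
    rw [hlen, List.range_succ_eq_map, List.any_cons, List.any_map]
    simp only [Function.comp_def, List.getD_cons_succ]
    simp only [List.getD_cons_succ] at ih
    rw [ih]
    simp [pvWin]

-- ===== VERDICT (by name: the statement is the Claim_ definition above) =====
theorem cond2_spec : Claim_equal_cond2 := by
  intro s _
  unfold Spec_cond2 cond2 cond2_alt
  simp only
  rw [a_eq_win, alt_eq_win]
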